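-- pv_equiv track=rewrite | github.com/masterzenith/code-pattern-practice | algoexpert/DynamicProgramming/hard/disk_stacking.py | disk_stacking
-- ===== SOURCE A (Python) =====
-- def disk_stacking(disks):
--     disks.sort(key=lambda disk: disk[2])
--     heights = [disk[2] for disk in disks]
--     sequences = [None for disk in disks]
--     max_height_idx = 0
--     for i in range(1, len(disks)):
--         current_disk = disks[i]
--         for j in range(i):
--             other_disk = disks[j]
--             if are_valid_dimensions(other_disk, current_disk):
--                 if heights[i] <= current_disk[2] + heights[j]:
--                     heights[i] = current_disk[2] + heights[j]
--                     sequences[i] = j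
--         if heights[i] >= heights[max_height_idx]:
--             max_height_idx = i
--     return build_sequence(disks, sequences, max_height_idx)
--
-- def are_valid_dimensions(o, c):
--     return o[0] < c[0] and o[1] < c[1] and o[2] < c[2]
--
-- def build_sequence(array, sequences, current_idx):
--     sequence = []
--     while current_idx is not None:
--         sequence.append(array[current_idx])
--         current_idx = sequences[current_idx]
--     return list(reversed(sequence))
-- ===== SOURCE B (Python) =====
-- def disk_stacking(disks):
--     # Same contract as A (sorts `disks` in place); top-down memoized recursion
--     # with predecessor links instead of A's bottom-up DP arrays.
--     disks.sort(key=lambda disk: disk[2])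
--     memo = {}
--     pred = {}
--
--     def best(i):
--         # max stack height with disk i on top; records the chosen predecessor
--         if i in memo:
--             return memo[i]
--         current = disks[i]
--         height = current[2]
--         chosen = None
--         for j in range(i):
--             other = disks[j]
--             if other[0] < current[0] and other[1] < current[1] and other[2] < current[2]:
--                 h = current[2] + best(j)
--                 if height <= h:
--                     height = h
--                     chosen = j
--         memo[i] = height
--         pred[i] = chosen
--         return height
--
--     top = 0
--     for i in range(len(disks)):
--         if best(i) >= best(top):
--             top = i
--
--     stack = []
--     idx = top
--     while idx is not None:
--         stack.append(disks[idx])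
--         idx = pred[idx]
--     stack.reverse()
--     return stack
-- ===== Notes on version B (the rewrite author's own statement) =====
-- stated objective: alternative
-- what changed: Replaces A's bottom-up DP over mutable heights/sequences arrays by a top-down memoized recursion best(i) with predecessor links recorded in a dict, driven per index and reconstructed by walking the links.
import Mathlib
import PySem

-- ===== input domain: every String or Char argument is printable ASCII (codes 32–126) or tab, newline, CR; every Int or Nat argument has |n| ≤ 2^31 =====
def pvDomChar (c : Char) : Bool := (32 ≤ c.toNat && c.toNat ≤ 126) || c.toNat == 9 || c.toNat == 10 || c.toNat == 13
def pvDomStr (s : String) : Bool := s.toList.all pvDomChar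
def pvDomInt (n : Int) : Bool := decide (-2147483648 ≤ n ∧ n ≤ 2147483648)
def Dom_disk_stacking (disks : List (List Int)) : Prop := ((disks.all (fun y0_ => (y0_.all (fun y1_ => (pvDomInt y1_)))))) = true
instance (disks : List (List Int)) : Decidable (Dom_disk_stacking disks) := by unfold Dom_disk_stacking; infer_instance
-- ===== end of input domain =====

-- B replaces A's bottom-up DP over mutable heights/sequences arrays by a memoized
-- top-down recursion with predecessor links (same cost, different decomposition);
-- both Pythons sort `disks` in place — the equivalence proved is about the return value
-- (B performs the same in-place sort as A).

-- ===== PORT A =====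
-- indices here are in range under Pre_ (every disk has ≥ 3 entries, list nonempty),
-- so Python's disk[2]/disks[j] are ported as getD; the while-loop of build_sequence
-- gets a fuel argument (ds.length) that merely makes it total: predecessor indices
-- strictly decrease, so the fuel is never exhausted before `None`.
def are_valid_dimensions (o c : List Int) : Bool :=
  decide (o.getD 0 0 < c.getD 0 0) && decide (o.getD 1 0 < c.getD 1 0) &&
    decide (o.getD 2 0 < c.getD 2 0)

def build_sequence (array : List (List Int)) (sequences : List (Option Nat)) :
    Nat → Option Nat → List (List Int) → List (List Int)
  | _, none, acc => acc.reverse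
  | 0, some _, acc => acc.reverse
  | fuel+1, some i, acc =>
      build_sequence array sequences fuel (sequences.getD i none) (acc ++ [array.getD i []])

-- the inner `for j in range(i)` loop of A, updating heights/sequences at index i
def aInner (ds : List (List Int)) (i : Nat) (st : List Int × List (Option Nat)) :
    List Int × List (Option Nat) :=
  let c := ds.getD i []
  (List.range i).foldl (fun (st : List Int × List (Option Nat)) j =>
    let o := ds.getD j []
    if are_valid_dimensions o c then
      if st.1.getD i 0 ≤ c.getD 2 0 + st.1.getD j 0 then
        (st.1.set i (c.getD 2 0 + st.1.getD j 0), st.2.set i (some j))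
      else st
    else st) st

def disk_stacking (disks : List (List Int)) : List (List Int) :=
  let ds := PySem.List.sorted disks (fun d => d.getD 2 0) false
  let heights := ds.map (fun d => d.getD 2 0)
  let sequences : List (Option Nat) := ds.map (fun _ => (none : Option Nat))
  let st := (List.range' 1 (ds.length - 1)).foldl
      (fun (st : List Int × List (Option Nat) × Nat) i =>
        let p := aInner ds i (st.1, st.2.1)
        let m := if p.1.getD st.2.2 0 ≤ p.1.getD i 0 then i else st.2.2
        (p.1, p.2, m)) (heights, sequences, 0)
  build_sequence ds st.2.1 ds.length (some st.2.2) []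

-- ===== PORT B =====
-- best(i) of Source B: the body of the memoized recursion, reading the already-memoized
-- best(j) (j < i) from the memo table `tbl`
def altStep (ds : List (List Int)) (tbl : List (Int × Option Nat)) (i : Nat) :
    Int × Option Nat :=
  let c := ds.getD i []
  (List.range i).foldl (fun (st : Int × Option Nat) j =>
    let o := ds.getD j []
    if o.getD 0 0 < c.getD 0 0 ∧ o.getD 1 0 < c.getD 1 0 ∧ o.getD 2 0 < c.getD 2 0 then
      (if st.1 ≤ c.getD 2 0 + (tbl.getD j (0, none)).1
       then (c.getD 2 0 + (tbl.getD j (0, none)).1, some j) else st)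
    else st) (c.getD 2 0, none)

-- the memo/pred caches of Source B: entry i holds (memo[i], pred[i])
def altTbl (ds : List (List Int)) : Nat → List (Int × Option Nat)
  | 0 => []
  | n+1 => let t := altTbl ds n; t ++ [altStep ds t n]

-- the `while idx is not None` reconstruction of Source B (same totality fuel as A's port)
def altWalk (ds : List (List Int)) (tbl : List (Int × Option Nat)) :
    Nat → Option Nat → List (List Int) → List (List Int)
  | _, none, acc => acc.reverse
  | 0, some _, acc => acc.reverse
  | fuel+1, some i, acc => altWalk ds tbl fuel (tbl.getD i (0, none)).2 (acc ++ [ds.getD i []])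

def disk_stacking_alt (disks : List (List Int)) : List (List Int) :=
  let ds := PySem.List.sorted disks (fun d => d.getD 2 0) false
  let tbl := altTbl ds ds.length
  let top := (List.range ds.length).foldl
      (fun top i => if (tbl.getD top (0, none)).1 ≤ (tbl.getD i (0, none)).1 then i else top) 0
  altWalk ds tbl ds.length (some top) []

-- ===== PRECONDITION & SPEC =====
-- Pre_ excludes exactly the inputs on which Python A raises: an empty list
-- (build_sequence indexes disks[0] → IndexError) and any disk with fewer than
-- 3 entries (disk[2] → IndexError in the sort key).
def Pre_disk_stacking (disks : List (List Int)) : Prop :=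
  disks ≠ [] ∧ ∀ d ∈ disks, 3 ≤ d.length
instance (disks : List (List Int)) : Decidable (Pre_disk_stacking disks) := by
  unfold Pre_disk_stacking; infer_instance
def pvWitness_disk_stacking : List (List Int) := [[2, 1, 2], [1, 2, 1], [3, 3, 3]]

def Spec_disk_stacking (disks : List (List Int)) (out : List (List Int)) : Prop :=
  out = disk_stacking_alt disks
instance (disks : List (List Int)) (out : List (List Int)) :
    Decidable (Spec_disk_stacking disks out) := by unfold Spec_disk_stacking; infer_instance

-- ===== CLAIM (what is proved, stated in full; the proofs are below) =====
def Claim_equal_disk_stacking : Prop := ∀ (disks : List (List Int)),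
  Dom_disk_stacking disks → Pre_disk_stacking disks →
    Spec_disk_stacking disks (disk_stacking disks)

-- ===== LEMMAS AND PROOFS =====

-- getD facts used throughout (thin wrappers over the core getElem? lemmas)
theorem pvGetD_set_self {α : Type} (l : List α) (i : Nat) (v d : α) (h : i < l.length) :
    (l.set i v).getD i d = v := by
  simp [List.getD_eq_getElem?_getD, h]

theorem pvGetD_set_ne {α : Type} (l : List α) (i j : Nat) (v d : α) (h : j ≠ i) :
    (l.set i v).getD j d = l.getD j d := by
  simp [List.getD_eq_getElem?_getD, List.getElem?_set_ne (Ne.symm h)]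

theorem pvGetD_default {α : Type} (l : List α) (n : Nat) (d : α) (h : l.length ≤ n) :
    l.getD n d = d := by
  simp [List.getD_eq_getElem?_getD, List.getElem?_eq_none h]

theorem pvGetD_map_heights (ds : List (List Int)) (k : Nat) :
    (ds.map (fun d => d.getD 2 0)).getD k 0 = (ds.getD k []).getD 2 0 := by
  simp only [List.getD_eq_getElem?_getD, List.getElem?_map]
  cases h : ds[k]? <;> simp

theorem pvGetD_map_none (ds : List (List Int)) (k : Nat) :
    (ds.map (fun _ => (none : Option Nat))).getD k none = none := by
  simp only [List.getD_eq_getElem?_getD, List.getElem?_map]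
  cases h : ds[k]? <;> simp

-- named loop bodies of the two ports (proof-only)
def bodyA (ds : List (List Int)) (i : Nat) (st : List Int × List (Option Nat)) (j : Nat) :
    List Int × List (Option Nat) :=
  let o := ds.getD j []
  if are_valid_dimensions o (ds.getD i []) then
    if st.1.getD i 0 ≤ (ds.getD i []).getD 2 0 + st.1.getD j 0 then
      (st.1.set i ((ds.getD i []).getD 2 0 + st.1.getD j 0), st.2.set i (some j))
    else st
  else st

def bodyB (ds : List (List Int)) (t : List (Int × Option Nat)) (i : Nat)
    (st : Int × Option Nat) (j : Nat) : Int × Option Nat :=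
  let o := ds.getD j []
  if o.getD 0 0 < (ds.getD i []).getD 0 0 ∧ o.getD 1 0 < (ds.getD i []).getD 1 0 ∧
      o.getD 2 0 < (ds.getD i []).getD 2 0 then
    (if st.1 ≤ (ds.getD i []).getD 2 0 + (t.getD j (0, none)).1
     then ((ds.getD i []).getD 2 0 + (t.getD j (0, none)).1, some j) else st)
  else st

def OB (ds : List (List Int)) (st : List Int × List (Option Nat) × Nat) (i : Nat) :
    List Int × List (Option Nat) × Nat :=
  let p := aInner ds i (st.1, st.2.1)
  let m := if p.1.getD st.2.2 0 ≤ p.1.getD i 0 then i else st.2.2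
  (p.1, p.2, m)

def gtop (ds : List (List Int)) (top i : Nat) : Nat :=
  if ((altTbl ds ds.length).getD top (0, none)).1 ≤
      ((altTbl ds ds.length).getD i (0, none)).1 then i else top

def initSt (ds : List (List Int)) : List Int × List (Option Nat) × Nat :=
  (ds.map (fun d => d.getD 2 0), ds.map (fun _ => (none : Option Nat)), 0)

def runA (ds : List (List Int)) : List (List Int) :=
  build_sequence ds ((List.range' 1 (ds.length - 1)).foldl (OB ds) (initSt ds)).2.1
    ds.length (some ((List.range' 1 (ds.length - 1)).foldl (OB ds) (initSt ds)).2.2) []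

def runB (ds : List (List Int)) : List (List Int) :=
  altWalk ds (altTbl ds ds.length) ds.length
    (some ((List.range ds.length).foldl (gtop ds) 0)) []

theorem aInner_eq_foldl (ds : List (List Int)) (i : Nat) (st : List Int × List (Option Nat)) :
    aInner ds i st = (List.range i).foldl (bodyA ds i) st := rfl

theorem altStep_eq_foldl (ds : List (List Int)) (t : List (Int × Option Nat)) (i : Nat) :
    altStep ds t i = (List.range i).foldl (bodyB ds t i) ((ds.getD i []).getD 2 0, none) := rfl

theorem disk_stacking_eq_runA (disks : List (List Int)) :
    disk_stacking disks = runA (PySem.List.sorted disks (fun d => d.getD 2 0) false) := rfl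

theorem disk_stacking_alt_eq_runB (disks : List (List Int)) :
    disk_stacking_alt disks = runB (PySem.List.sorted disks (fun d => d.getD 2 0) false) := rfl

theorem altTbl_length (ds : List (List Int)) (n : Nat) : (altTbl ds n).length = n := by
  induction n with
  | zero => rfl
  | succ n ih => simp [altTbl, ih]

theorem altTbl_getD_lt (ds : List (List Int)) {j m : Nat} (h : j < m) :
    (altTbl ds m).getD j (0, none) = altStep ds (altTbl ds j) j := by
  induction m with
  | zero => omega
  | succ m ih =>
    show ((altTbl ds m) ++ [altStep ds (altTbl ds m) m]).getD j (0, none) = _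
    rcases Nat.lt_or_ge j m with hj | hj
    · rw [List.getD_eq_getElem?_getD,
        List.getElem?_append_left (by rw [altTbl_length]; exact hj),
        ← List.getD_eq_getElem?_getD]
      exact ih hj
    · have hjm : j = m := by omega
      subst hjm
      rw [List.getD_eq_getElem?_getD,
        List.getElem?_append_right (le_of_eq (altTbl_length ds j))]
      simp [altTbl_length]

theorem valid_iff (o c : List Int) :
    are_valid_dimensions o c = true ↔
      (o.getD 0 0 < c.getD 0 0 ∧ o.getD 1 0 < c.getD 1 0 ∧ o.getD 2 0 < c.getD 2 0) := by
  simp [are_valid_dimensions, and_assoc]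

theorem altStep_congr (ds : List (List Int)) (t₁ t₂ : List (Int × Option Nat)) (i : Nat)
    (h : ∀ j, j < i → t₁.getD j (0, none) = t₂.getD j (0, none)) :
    altStep ds t₁ i = altStep ds t₂ i := by
  rw [altStep_eq_foldl, altStep_eq_foldl]
  apply PySem.List.foldl_congr_mem
  intro acc j hj
  have hj' : j < i := List.mem_range.mp hj
  simp only [bodyB, h j hj']

theorem altTbl_getD_self (ds : List (List Int)) {i m : Nat} (h : i < m) :
    (altTbl ds m).getD i (0, none) = altStep ds (altTbl ds m) i := by
  rw [altTbl_getD_lt ds h]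
  apply altStep_congr
  intro j hj
  rw [altTbl_getD_lt ds hj, altTbl_getD_lt ds (hj.trans h)]

theorem inner_gen (ds : List (List Int)) (t : List (Int × Option Nat)) (i : Nat)
    (js : List Nat) (hjs : ∀ j ∈ js, j < i) :
    ∀ (hs : List Int) (ss : List (Option Nat)), i < hs.length → i < ss.length →
    (∀ j, j < i → hs.getD j 0 = (t.getD j (0, none)).1) →
    js.foldl (bodyA ds i) (hs, ss) =
      (hs.set i (js.foldl (bodyB ds t i) (hs.getD i 0, ss.getD i none)).1,
       ss.set i (js.foldl (bodyB ds t i) (hs.getD i 0, ss.getD i none)).2) := by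
  induction js with
  | nil =>
    intro hs ss hil hsl _
    simp only [List.foldl_nil]
    rw [List.getD_eq_getElem hs 0 hil, List.getD_eq_getElem ss none hsl,
      List.set_getElem_self, List.set_getElem_self]
  | cons j js ih =>
    intro hs ss hil hsl hag
    have hj : j < i := hjs j (by simp)
    have hjs' : ∀ x ∈ js, x < i := fun x hx => hjs x (by simp [hx])
    simp only [List.foldl_cons]
    by_cases hv : (ds.getD j []).getD 0 0 < (ds.getD i []).getD 0 0 ∧
        (ds.getD j []).getD 1 0 < (ds.getD i []).getD 1 0 ∧
        (ds.getD j []).getD 2 0 < (ds.getD i []).getD 2 0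
    · have hvb : are_valid_dimensions (ds.getD j []) (ds.getD i []) = true :=
        (valid_iff _ _).mpr hv
      by_cases hc : hs.getD i 0 ≤ (ds.getD i []).getD 2 0 + (t.getD j (0, none)).1
      · have eA : bodyA ds i (hs, ss) j =
            (hs.set i ((ds.getD i []).getD 2 0 + (t.getD j (0, none)).1),
             ss.set i (some j)) := by
          simp only [bodyA, hvb, if_true, hag j hj]
          rw [if_pos hc]
        have eB : bodyB ds t i (hs.getD i 0, ss.getD i none) j =
            ((ds.getD i []).getD 2 0 + (t.getD j (0, none)).1, some j) := by
          simp only [bodyB, if_pos hv]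
          rw [if_pos hc]
        rw [eA, eB]
        rw [ih hjs' _ _ (by simpa using hil) (by simpa using hsl)
          (fun k hk => by rw [pvGetD_set_ne _ _ _ _ _ (by omega)]; exact hag k hk)]
        rw [pvGetD_set_self _ _ _ _ hil, pvGetD_set_self _ _ _ _ hsl,
          List.set_set, List.set_set]
      · have eA : bodyA ds i (hs, ss) j = (hs, ss) := by
          simp only [bodyA, hvb, if_true, hag j hj]
          rw [if_neg hc]
        have eB : bodyB ds t i (hs.getD i 0, ss.getD i none) j =
            (hs.getD i 0, ss.getD i none) := by
          simp only [bodyB, if_pos hv]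
          rw [if_neg hc]
        rw [eA, eB]
        exact ih hjs' _ _ hil hsl hag
    · have hvb : are_valid_dimensions (ds.getD j []) (ds.getD i []) = false := by
        cases h : are_valid_dimensions (ds.getD j []) (ds.getD i [])
        · rfl
        · exact absurd ((valid_iff _ _).mp h) hv
      have eA : bodyA ds i (hs, ss) j = (hs, ss) := by
        simp only [bodyA, hvb]
        rfl
      have eB : bodyB ds t i (hs.getD i 0, ss.getD i none) j =
          (hs.getD i 0, ss.getD i none) := by
        simp only [bodyB, if_neg hv]
      rw [eA, eB]
      exact ih hjs' _ _ hil hsl hag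

theorem outer_inv (ds : List (List Int)) (m : Nat) (hm : m + 1 ≤ ds.length) :
    (∀ k, ((List.range' 1 m).foldl (OB ds) (initSt ds)).1.getD k 0 =
        if k < m + 1 then ((altTbl ds ds.length).getD k (0, none)).1
        else (ds.getD k []).getD 2 0)
  ∧ (∀ k, ((List.range' 1 m).foldl (OB ds) (initSt ds)).2.1.getD k none =
        if k < m + 1 then ((altTbl ds ds.length).getD k (0, none)).2 else none)
  ∧ ((List.range' 1 m).foldl (OB ds) (initSt ds)).1.length = ds.length
  ∧ ((List.range' 1 m).foldl (OB ds) (initSt ds)).2.1.length = ds.length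
  ∧ ((List.range' 1 m).foldl (OB ds) (initSt ds)).2.2 ≤ m
  ∧ ((List.range' 1 m).foldl (OB ds) (initSt ds)).2.2 =
      (List.range' 1 m).foldl (gtop ds) 0 := by
  induction m with
  | zero =>
    have h0 : (altTbl ds ds.length).getD 0 (0, none) =
        ((ds.getD 0 []).getD 2 0, none) := by
      rw [altTbl_getD_self ds (by omega)]
      apply (altStep_congr ds (altTbl ds ds.length) [] 0 (by omega)).trans
      rfl
    refine ⟨?_, ?_, by simp [initSt], by simp [initSt], le_refl _, rfl⟩
    · intro k
      rcases Nat.lt_or_ge k 1 with hk | hk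
      · interval_cases k
        simp only [List.range'_zero, List.foldl_nil, initSt, if_pos (by omega : (0:Nat) < 1)]
        rw [h0, pvGetD_map_heights]
      · rw [if_neg (by omega)]
        simp only [List.range'_zero, List.foldl_nil, initSt]
        exact pvGetD_map_heights ds k
    · intro k
      rcases Nat.lt_or_ge k 1 with hk | hk
      · interval_cases k
        simp only [List.range'_zero, List.foldl_nil, initSt, if_pos (by omega : (0:Nat) < 1)]
        rw [h0, pvGetD_map_none]
      · rw [if_neg (by omega)]
        simp only [List.range'_zero, List.foldl_nil, initSt]
        exact pvGetD_map_none ds k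
  | succ m ih =>
    obtain ⟨hH, hS, hLh, hLs, htople, htop⟩ := ih (by omega)
    have hcat : List.range' 1 (m + 1) = List.range' 1 m ++ [m + 1] := by
      simp [List.range'_concat, Nat.add_comm]
    have hi : m + 1 < ds.length := by omega
    -- abbreviations
    set ST := (List.range' 1 m).foldl (OB ds) (initSt ds) with hST
    have hstep : (List.range' 1 (m + 1)).foldl (OB ds) (initSt ds) = OB ds ST (m + 1) := by
      rw [hcat, List.foldl_append]
      rfl
    -- characterize the aInner call at i = m+1
    have hinner : aInner ds (m + 1) (ST.1, ST.2.1) =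
        (ST.1.set (m + 1) ((altTbl ds ds.length).getD (m + 1) (0, none)).1,
         ST.2.1.set (m + 1) ((altTbl ds ds.length).getD (m + 1) (0, none)).2) := by
      rw [aInner_eq_foldl]
      rw [inner_gen ds (altTbl ds ds.length) (m + 1) (List.range (m + 1))
        (fun j hj => List.mem_range.mp hj) ST.1 ST.2.1 (by omega) (by omega)
        (fun j hj => by rw [hH j, if_pos (by omega)])]
      have h1 : ST.1.getD (m + 1) 0 = (ds.getD (m + 1) []).getD 2 0 := by
        rw [hH (m + 1), if_neg (by omega)]
      have h2 : ST.2.1.getD (m + 1) none = none := by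
        rw [hS (m + 1), if_neg (by omega)]
      rw [h1, h2, ← altStep_eq_foldl, ← altTbl_getD_self ds hi]
    have hOB : OB ds ST (m + 1) =
        (ST.1.set (m + 1) ((altTbl ds ds.length).getD (m + 1) (0, none)).1,
         ST.2.1.set (m + 1) ((altTbl ds ds.length).getD (m + 1) (0, none)).2,
         gtop ds ST.2.2 (m + 1)) := by
      simp only [OB, hinner]
      rw [pvGetD_set_self _ _ _ _ (show m + 1 < ST.1.length by omega),
        pvGetD_set_ne _ _ _ _ _ (show ST.2.2 ≠ m + 1 by omega),
        hH ST.2.2, if_pos (show ST.2.2 < m + 1 by omega)]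
      rfl
    rw [hstep, hOB]
    refine ⟨?_, ?_, by simpa using hLh, by simpa using hLs, ?_, ?_⟩
    · intro k
      rcases eq_or_ne k (m + 1) with hk | hk
      · subst hk
        rw [pvGetD_set_self _ _ _ _ (by omega), if_pos (by omega)]
      · rw [pvGetD_set_ne _ _ _ _ _ hk, hH k]
        by_cases hk2 : k < m + 1
        · rw [if_pos hk2, if_pos (by omega)]
        · rw [if_neg hk2, if_neg (by omega)]
    · intro k
      rcases eq_or_ne k (m + 1) with hk | hk
      · subst hk
        rw [pvGetD_set_self _ _ _ _ (by omega), if_pos (by omega)]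
      · rw [pvGetD_set_ne _ _ _ _ _ hk, hS k]
        by_cases hk2 : k < m + 1
        · rw [if_pos hk2, if_pos (by omega)]
        · rw [if_neg hk2, if_neg (by omega)]
    · show gtop ds ST.2.2 (m + 1) ≤ m + 1
      unfold gtop
      split
      · exact le_refl _
      · omega
    · show gtop ds ST.2.2 (m + 1) = (List.range' 1 (m + 1)).foldl (gtop ds) 0
      rw [hcat, List.foldl_append, ← htop]
      rfl

theorem walk_eq (ds : List (List Int)) (t : List (Int × Option Nat))
    (ss : List (Option Nat)) (h : ∀ k, ss.getD k none = (t.getD k (0, none)).2) :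
    ∀ (fuel : Nat) (cur : Option Nat) (acc : List (List Int)),
      build_sequence ds ss fuel cur acc = altWalk ds t fuel cur acc := by
  intro fuel
  induction fuel with
  | zero => intro cur acc; cases cur <;> rfl
  | succ f ihf =>
    intro cur acc
    cases cur with
    | none => rfl
    | some i =>
      show build_sequence ds ss f (ss.getD i none) (acc ++ [ds.getD i []]) = _
      rw [h i]
      exact ihf _ _

theorem top_eq (ds : List (List Int)) (hn : 0 < ds.length) :
    (List.range ds.length).foldl (gtop ds) 0 =
      (List.range' 1 (ds.length - 1)).foldl (gtop ds) 0 := by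
  obtain ⟨n, hn'⟩ : ∃ n, ds.length = n + 1 := ⟨ds.length - 1, by omega⟩
  rw [hn', List.range_eq_range', List.range'_succ]
  simp only [List.foldl_cons, Nat.add_sub_cancel]
  rw [show gtop ds 0 0 = 0 from by unfold gtop; split <;> rfl]

theorem run_eq (ds : List (List Int)) (hne : ds ≠ []) : runA ds = runB ds := by
  have hn : 0 < ds.length := by cases ds with | nil => exact absurd rfl hne | cons a l => simp
  obtain ⟨hH, hS, hLh, hLs, htople, htop⟩ := outer_inv ds (ds.length - 1) (by omega)
  unfold runA runB
  rw [htop, ← top_eq ds hn]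
  apply walk_eq
  intro k
  rw [hS k]
  rcases Nat.lt_or_ge k ds.length with hk | hk
  · rw [if_pos (by omega)]
  · rw [if_neg (by omega), pvGetD_default _ _ _ (by rw [altTbl_length]; omega)]

-- ===== VERDICT (by name: the statement is the Claim_ definition above) =====
theorem disk_stacking_spec : Claim_equal_disk_stacking := by
  intro disks _ hpre
  unfold Spec_disk_stacking
  rw [disk_stacking_eq_runA, disk_stacking_alt_eq_runB]
  apply run_eq
  intro h
  exact hpre.1 ((PySem.List.sorted_eq_nil_iff _ _ _).mp h)
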